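-- pv_equiv track=rewrite | github.com/gabriellaec/desoft-analise-exercicios | backup/user_061/ch9_2019_04_04_14_07_24_717346.py | lista_de_sufixos
-- ===== SOURCE A (Python) =====
-- def lista_de_sufixos(string):
--     lista = []
--     i = len(string) - 1
--     soma = ''
--     while i >= 0:
--         soma += string[i]
--         lista.append(soma)
--         i -= 1
--     return lista
-- ===== SOURCE B (Python) =====
-- def lista_de_sufixos(string):
--     r = string[::-1]
--     return [r[:k+1] for k in range(len(string))]
-- ===== Notes on version B (the rewrite author's own statement) =====
-- stated objective: simpler
-- what changed: B reverses the string once and returns its growing prefixes by slicing, instead of accumulating one character at a time in a descending-index while loop.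
import Mathlib
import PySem

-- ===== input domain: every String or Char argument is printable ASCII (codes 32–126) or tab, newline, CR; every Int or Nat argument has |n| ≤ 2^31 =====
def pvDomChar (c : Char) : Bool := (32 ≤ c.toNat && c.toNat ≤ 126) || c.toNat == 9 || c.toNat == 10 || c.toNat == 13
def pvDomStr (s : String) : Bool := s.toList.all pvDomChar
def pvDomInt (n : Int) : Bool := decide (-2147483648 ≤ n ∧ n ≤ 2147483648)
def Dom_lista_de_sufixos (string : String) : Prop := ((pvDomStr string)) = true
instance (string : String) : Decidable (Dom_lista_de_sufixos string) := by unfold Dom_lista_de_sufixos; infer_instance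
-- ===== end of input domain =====

-- B computes string[::-1] once, then returns its growing prefixes by slicing;
-- objective: simpler (table-then-slice instead of char-by-char accumulation). A=B is proved on all inputs.


-- ===== PORT A =====
-- while i >= 0: soma += string[i]; lista.append(soma); i -= 1
-- (the `none` branch of pyGet? is Python's IndexError; it is unreachable here since 0 ≤ i < len)
def listaLoopA (cs : List Char) (i : Int) (soma : List Char) (lista : List String) : List String :=
  if _h : 0 ≤ i then
    match PySem.List.pyGet? cs i with
    | some c => listaLoopA cs (i - 1) (soma ++ [c]) (lista ++ [String.ofList (soma ++ [c])])
    | none => lista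
  else lista
termination_by (i + 1).toNat
decreasing_by omega

def lista_de_sufixos (string : String) : List String :=
  listaLoopA string.toList (PySem.Str.len string - 1) [] []

-- ===== PORT B =====
-- r = string[::-1]; return [r[:k+1] for k in range(len(string))]
def lista_de_sufixos_alt (string : String) : List String :=
  let r : List Char := (PySem.List.slice? string.toList none none (-1)).getD []
  (PySem.List.pyRange 0 (PySem.Str.len string) 1).map
    (fun k => String.ofList (PySem.List.slice r none (some (k + 1))))

-- ===== PRECONDITION & SPEC =====
def Spec_lista_de_sufixos (string : String) (out : List String) : Prop := out = lista_de_sufixos_alt string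
instance (string : String) (out : List String) : Decidable (Spec_lista_de_sufixos string out) := by unfold Spec_lista_de_sufixos; infer_instance

-- ===== CLAIM (what is proved, stated in full; the proofs are below) =====
def Claim_equal_lista_de_sufixos : Prop := ∀ (string : String), Dom_lista_de_sufixos string → Spec_lista_de_sufixos string (lista_de_sufixos string)

-- ===== LEMMAS AND PROOFS =====

-- Loop invariant: with j iterations left (i = j-1) and soma = the reversed already-seen tail,
-- the loop appends the prefixes of cs.reverse of lengths (cs.length - j + 1) … cs.length.
theorem listaLoopA_inv (cs : List Char) (j : Nat) (hj : j ≤ cs.length) (lista : List String) :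
    listaLoopA cs ((j : Int) - 1) ((cs.drop j).reverse) lista
      = lista ++ (List.range' (cs.length - j) j).map
          (fun k => String.ofList (cs.reverse.take (k + 1))) := by
  induction j generalizing lista with
  | zero => simp [listaLoopA]
  | succ j ih =>
    have hjl : j < cs.length := hj
    rw [listaLoopA]
    have h0 : (0:Int) ≤ (j + 1 : Nat) - 1 := by push_cast; omega
    rw [dif_pos h0]
    have hcast : ((j + 1 : Nat) : Int) - 1 = ((j : Nat) : Int) := by push_cast; omega
    have hget : PySem.List.pyGet? cs (((j + 1 : Nat) : Int) - 1) = some cs[j] := by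
      rw [hcast, PySem.List.pyGet?_natCast]
      simp [hjl]
    rw [hget]
    have hsoma : (cs.drop (j + 1)).reverse ++ [cs[j]] = (cs.drop j).reverse := by
      rw [List.drop_eq_getElem_cons hjl, List.reverse_cons]
    dsimp only
    rw [hsoma, hcast, ih (le_of_lt hjl)]
    have hpref : (cs.drop j).reverse = cs.reverse.take (cs.length - j) := by
      rw [List.reverse_drop]
    have e : cs.length - (j + 1) + 1 = cs.length - j := by omega
    have hrange : List.range' (cs.length - (j + 1)) (j + 1)
        = (cs.length - (j + 1)) :: List.range' (cs.length - j) j := by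
      rw [List.range'_succ, e]
    have hk : cs.length - (j + 1) + 1 = cs.length - j := by omega
    simp [hrange, hk, hpref, List.append_assoc]

-- ===== VERDICT (by name: the statement is the Claim_ definition above) =====
theorem lista_de_sufixos_spec : Claim_equal_lista_de_sufixos := by
  intro string _
  unfold Spec_lista_de_sufixos lista_de_sufixos lista_de_sufixos_alt
  have hlen : PySem.Str.len string = (string.toList.length : Int) := by
    simp [PySem.Str.len_eq]
  rw [hlen]
  have hmain := listaLoopA_inv string.toList string.toList.length (le_refl _) []
  simp only [List.drop_length, List.reverse_nil, Nat.sub_self, List.nil_append] at hmain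
  rw [hmain, PySem.List.slice?_none_none_neg_one]
  simp only [Option.getD_some]
  rw [PySem.List.pyRange_zero_nat]
  rw [List.map_map, List.range_eq_range']
  apply List.map_congr_left
  intro k hk
  have hk0 : (0:Int) ≤ (k:Int) + 1 := by positivity
  rw [Function.comp_apply, PySem.List.slice_to _ hk0]
  have : ((k:Int) + 1).toNat = k + 1 := by omega
  rw [this]
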